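-- pv_equiv track=rewrite | github.com/SadafAsad/Linear-Algebra | permutationMatrixSquareRoot.py | evenCycleComposition
-- ===== SOURCE A (Python) =====
-- def product(list1, list2):
--     n1 = len(list1)
--     n2 = len(list2)
--     n1_index = 0
--     n2_index = 0
--     list3 = list()
--     for i in range(n1+n2):
--         if i%2==0:
--             list3.append(list1[n1_index])
--             n1_index+=1
--         else:
--             list3.append(list2[n2_index])
--             n2_index+=1
--     return list3
--
-- def evenCycleComposition(even_cycles):
--     ans = list()
--     n = len(even_cycles)
--     i = 0
--     while i<n:
--         cycle_len = len(even_cycles[i])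
--         r = i+1
--         while r<n:
--             if len(even_cycles[r])==cycle_len:
--                 new_cycle = product(even_cycles[i], even_cycles[r])
--                 ans.append(new_cycle)
--                 even_cycles.pop(r)
--                 even_cycles.pop(i)
--                 n = len(even_cycles)
--                 break
--             r+=1
--         i = 0
--     return ans
-- ===== SOURCE B (Python) =====
-- # B: two passes with dicts (rank counting + a (length, rank) partner table) instead of
-- # A's repeated scan-and-pop; B does not mutate its argument (A empties it in place).
-- def evenCycleComposition(even_cycles):
--     cnt = {}               # length -> how many cycles of that length seen so far
--     ranks = []             # rank of each cycle within its length class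
--     table = {}             # (length, rank) -> that cycle
--     for c in even_cycles:
--         k = cnt.get(len(c), 0)
--         cnt[len(c)] = k + 1
--         ranks.append(k)
--         table[(len(c), k)] = c
--     res = []
--     for c, k in zip(even_cycles, ranks):
--         if k % 2 == 0:
--             partner = table[(len(c), k + 1)]
--             res.append([x for pair in zip(c, partner) for x in pair])
--     return res
-- ===== Notes on version B (the rewrite author's own statement) =====
-- stated objective: alternative
-- what changed: A repeatedly rescans and pops the mutable list to pair the first cycle with the first later equal-length cycle (and loops forever if some length occurs an odd number of times); B instead makes one pass recording each cycle's rank within its length class in a (length, rank) dictionary and a second pass that pairs every even-rank cycle with the (length, rank+1) entry, so no inner scan or pop remains. Pre_ excludes only inputs with an odd-count length, on which A never returns (infinite loop), so nothing A returns on is excluded.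
import Mathlib
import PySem

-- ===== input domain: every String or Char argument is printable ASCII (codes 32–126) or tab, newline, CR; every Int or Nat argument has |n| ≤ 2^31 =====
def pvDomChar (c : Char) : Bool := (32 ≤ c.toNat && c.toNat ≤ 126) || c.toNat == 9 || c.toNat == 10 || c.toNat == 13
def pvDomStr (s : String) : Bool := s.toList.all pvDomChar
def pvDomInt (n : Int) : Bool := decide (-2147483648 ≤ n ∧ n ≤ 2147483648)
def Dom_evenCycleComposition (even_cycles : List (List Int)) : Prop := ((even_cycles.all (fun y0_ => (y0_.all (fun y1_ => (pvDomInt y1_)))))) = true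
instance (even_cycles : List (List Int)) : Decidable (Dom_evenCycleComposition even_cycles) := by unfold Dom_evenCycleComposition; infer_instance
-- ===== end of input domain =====

-- B pairs each cycle with the next cycle of equal length via (length, rank) dictionaries
-- built in one pass, instead of A's repeated scan-and-pop; the equivalence is about the
-- RETURN value only (Python A empties its argument list in place, B does not touch it).

-- ===== PORT A =====
-- helper `product` of Source A: interleave by an index loop over range(n1+n2)
-- (inside A it is only ever called with lists of equal length, so the indexing
--  never raises; pyGetD's default is unreachable there).
def pyProduct (list1 list2 : List Int) : List Int :=
  ((PySem.List.pyRange 0 ((list1.length : Int) + (list2.length : Int)) 1).foldl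
    (fun (st : List Int × Int × Int) i =>
      if i % 2 == 0 then
        (st.1 ++ [PySem.List.pyGetD list1 st.2.1 0], st.2.1 + 1, st.2.2)
      else
        (st.1 ++ [PySem.List.pyGetD list2 st.2.2 0], st.2.1, st.2.2 + 1))
    ([], 0, 0)).1

-- A's outer while-loop: i is reset to 0 after every pairing, so the loop always works on
-- the current head; the inner while scans for the first later cycle of the same length and
-- pops both.  When no partner exists Python loops FOREVER (i is reset to 0 and nothing
-- changes); that divergence is excluded by Pre_ below and the port returns ans there.
def loopA : List (List Int) → List (List Int) → List (List Int)
  | [], ans => ans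
  | c :: rest, ans =>
    match rest.findIdx? (fun d => d.length == c.length) with
    | some r => loopA (rest.eraseIdx r) (ans ++ [pyProduct c (rest.getD r [])])
    | none => ans
termination_by cs _ => cs.length
decreasing_by
  have := List.length_eraseIdx_le (l := rest) (i := r)
  simp; omega

def evenCycleComposition (even_cycles : List (List Int)) : List (List Int) :=
  loopA even_cycles []

-- ===== PORT B =====
-- One pass records, per cycle: its rank within its length class (cnt), the ranks list, and
-- a (length, rank) ↦ cycle table; a second pass emits, for every even-rank cycle, its
-- interleaving with the (length, rank+1) partner.  Python raises KeyError when the partner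
-- is missing (odd class, outside Pre_); the port's getD default [] stands in for that.
def evenCycleComposition_alt (even_cycles : List (List Int)) : List (List Int) :=
  let st := even_cycles.foldl
    (fun (st : PySem.Dict Int Int × List Int × PySem.Dict (Int × Int) (List Int)) c =>
      let k := st.1.getD (c.length : Int) 0
      (st.1.insert (c.length : Int) (k + 1), st.2.1 ++ [k], st.2.2.insert ((c.length : Int), k) c))
    (PySem.Dict.empty, [], PySem.Dict.empty)
  (even_cycles.zip st.2.1).foldl
    (fun res ck =>
      if ck.2 % 2 == 0 then
        res ++ [(ck.1.zip (st.2.2.getD ((ck.1.length : Int), ck.2 + 1) [])).flatMap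
                  (fun p => [p.1, p.2])]
      else res)
    []

-- ===== PRECONDITION & SPEC =====
-- Pre_: every cycle length occurs an even number of times — exactly the inputs on which
-- Python A terminates (on any other input A's outer while-loop runs forever, returning
-- nothing, so nothing is excluded on which A returns).
def Pre_evenCycleComposition (even_cycles : List (List Int)) : Prop :=
  ∀ c ∈ even_cycles, Even (even_cycles.countP (fun d => d.length == c.length))

instance (even_cycles : List (List Int)) : Decidable (Pre_evenCycleComposition even_cycles) := by
  unfold Pre_evenCycleComposition; infer_instance

def pvWitness_evenCycleComposition : List (List Int) := [[1, 2], [0], [3, 4], [5]]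

def Spec_evenCycleComposition (even_cycles : List (List Int)) (out : List (List Int)) : Prop :=
  out = evenCycleComposition_alt even_cycles
instance (even_cycles : List (List Int)) (out : List (List Int)) : Decidable (Spec_evenCycleComposition even_cycles out) := by
  unfold Spec_evenCycleComposition; infer_instance

-- ===== CLAIM (what is proved, stated in full; the proofs are below) =====
def Claim_equal_evenCycleComposition : Prop := ∀ (even_cycles : List (List Int)), Dom_evenCycleComposition even_cycles → Pre_evenCycleComposition even_cycles → Spec_evenCycleComposition even_cycles (evenCycleComposition even_cycles)

-- ===== LEMMAS AND PROOFS =====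

-- the interleaving B computes
def inter (x y : List Int) : List Int := (x.zip y).flatMap (fun p => [p.1, p.2])

-- canonical pairing: walk the list keeping the already-seen prefix `pre`; a cycle of even
-- rank (count of equal-length cycles seen before it) is paired with the first equal-length
-- cycle after it.
def go (pre : List (List Int)) : List (List Int) → List (List Int)
  | [] => []
  | c :: suf =>
    (if pre.countP (fun d => d.length == c.length) % 2 = 0 then
       [inter c ((suf.find? (fun d => d.length == c.length)).getD [])]
     else []) ++ go (pre ++ [c]) suf

-- B's first fold and its state
def stepB (st : PySem.Dict Int Int × List Int × PySem.Dict (Int × Int) (List Int))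
    (c : List Int) : PySem.Dict Int Int × List Int × PySem.Dict (Int × Int) (List Int) :=
  let k := st.1.getD (c.length : Int) 0
  (st.1.insert (c.length : Int) (k + 1), st.2.1 ++ [k], st.2.2.insert ((c.length : Int), k) c)

def SB (pre : List (List Int)) : PySem.Dict Int Int × List Int × PySem.Dict (Int × Int) (List Int) :=
  pre.foldl stepB (PySem.Dict.empty, [], PySem.Dict.empty)

-- the ranks the first fold produces, with the seen-prefix made explicit
def rks (pre : List (List Int)) : List (List Int) → List Int
  | [] => []
  | c :: suf => ((pre.countP (fun d => d.length == c.length) : Int)) :: rks (pre ++ [c]) suf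

theorem findIdx?_spec {α : Type} (p : α → Bool) :
    ∀ (l : List α) (r : Nat), l.findIdx? p = some r →
    ∃ h : r < l.length, p l[r] = true ∧ ∀ j (hj : j < r), p (l[j]'(by omega)) = false := by
  intro l
  induction l with
  | nil => intro r h; simp at h
  | cons a l ih =>
    intro r h
    rw [List.findIdx?_cons] at h
    by_cases hp : p a = true
    · simp [hp] at h
      subst h
      exact ⟨by simp, by simpa using hp, by omega⟩
    · simp [hp] at h
      obtain ⟨r', hr', rfl⟩ := h
      obtain ⟨hlt, hpr, hprev⟩ := ih r' hr'
      refine ⟨by simpa using hlt, by simpa using hpr, ?_⟩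
      intro j hj
      cases j with
      | zero => simpa using hp
      | succ j => simpa using hprev j (by omega)

theorem findIdx?_isSome {α : Type} (p : α → Bool) :
    ∀ (l : List α), (∃ x ∈ l, p x = true) → ∃ r, l.findIdx? p = some r := by
  intro l h
  exact ⟨_, List.findIdx?_eq_some_of_exists h⟩

theorem go_ctx (xs : List (List Int)) :
    ∀ (ctx1 ctx2 : List (List Int)),
    (∀ L : Nat, ctx1.countP (fun d => d.length == L) % 2 = ctx2.countP (fun d => d.length == L) % 2) →
    go ctx1 xs = go ctx2 xs := by
  induction xs with
  | nil => intro _ _ _; rfl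
  | cons c suf ih =>
    intro ctx1 ctx2 h
    simp only [go]
    rw [h c.length, ih (ctx1 ++ [c]) (ctx2 ++ [c])]
    intro L
    simp only [List.countP_append, List.countP_cons, List.countP_nil]
    have := h L
    by_cases hc : c.length = L <;> simp [hc] <;> omega

theorem go_erase (A : List (List Int)) :
    ∀ (ctx1 ctx2 : List (List Int)) (p : List Int) (S : List (List Int)),
    (∀ L : Nat, L ≠ p.length →
      ctx1.countP (fun d => d.length == L) % 2 = ctx2.countP (fun d => d.length == L) % 2) →
    (ctx1.countP (fun d => d.length == p.length) % 2 = 1) →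
    (ctx2.countP (fun d => d.length == p.length) % 2 = 0) →
    (∀ a ∈ A, a.length ≠ p.length) →
    go ctx1 (A ++ p :: S) = go ctx2 (A ++ S) := by
  induction A with
  | nil =>
    intro ctx1 ctx2 p S hne h1 h2 _
    simp only [List.nil_append, go]
    rw [h1]
    simp only [if_neg (by omega : ¬ (1 = 0))]
    rw [List.nil_append]
    apply go_ctx
    intro L
    simp only [List.countP_append, List.countP_cons, List.countP_nil]
    by_cases hL : L = p.length
    · subst hL; simp; omega
    · have := hne L hL
      simp [beq_iff_eq, Ne.symm hL]
      omega
  | cons a A ih =>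
    intro ctx1 ctx2 p S hne h1 h2 hA
    have haL : a.length ≠ p.length := hA a (by simp)
    simp only [List.cons_append, go]
    have hcnt : ctx1.countP (fun d => d.length == a.length) % 2
        = ctx2.countP (fun d => d.length == a.length) % 2 := hne a.length haL
    rw [hcnt]
    have hfind : (A ++ p :: S).find? (fun d => d.length == a.length)
        = (A ++ S).find? (fun d => d.length == a.length) := by
      rw [List.find?_append, List.find?_append, List.find?_cons]
      have hpf : (p.length == a.length) = false := by simp [Ne.symm haL]
      rw [hpf]
    rw [hfind]
    congr 1
    apply ih
    · intro L hL
      simp only [List.countP_append, List.countP_cons, List.countP_nil]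
      have := hne L hL
      by_cases hc : a.length = L <;> simp [hc] <;> omega
    · simp only [List.countP_append, List.countP_cons, List.countP_nil]
      simp [haL]; omega
    · simp only [List.countP_append, List.countP_cons, List.countP_nil]
      simp [haL]; omega
    · intro b hb; exact hA b (by simp [hb])

theorem SB_append_singleton (pre : List (List Int)) (c : List Int) :
    SB (pre ++ [c]) = stepB (SB pre) c := by
  simp [SB, List.foldl_append]

theorem SB_cnt (pre : List (List Int)) : ∀ (L : Nat),
    (SB pre).1.getD (L : Int) 0 = (pre.countP (fun d => d.length == L) : Int) := by
  induction pre using List.reverseRecOn with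
  | nil => intro L; simp [SB, PySem.Dict.getD_empty]
  | append_singleton pre c ih =>
    intro L
    rw [SB_append_singleton]
    simp only [stepB, PySem.Dict.getD_insert, List.countP_append, List.countP_cons,
      List.countP_nil]
    by_cases hL : (L : Int) = (c.length : Int)
    · have : c.length = L := by exact_mod_cast hL.symm
      rw [if_pos hL, ih]
      simp [this]
    · have : c.length ≠ L := fun h => hL (by exact_mod_cast h.symm)
      rw [if_neg hL, ih]
      simp [this]

theorem SB_tab (pre : List (List Int)) : ∀ (L k : Nat),
    (SB pre).2.2.get? ((L : Int), (k : Int)) = (pre.filter (fun d => d.length == L))[k]? := by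
  induction pre using List.reverseRecOn with
  | nil => intro L k; simp [SB, PySem.Dict.get?_empty]
  | append_singleton pre c ih =>
    intro L k
    rw [SB_append_singleton]
    simp only [stepB, PySem.Dict.get?_insert, List.filter_append]
    rw [SB_cnt pre c.length]
    by_cases hL : L = c.length
    · subst hL
      simp only [List.filter_cons, List.filter_nil, beq_self_eq_true, if_true]
      have hlen : (pre.filter (fun d => d.length == c.length)).length
          = pre.countP (fun d => d.length == c.length) := Eq.symm List.countP_eq_length_filter
      by_cases hk : k = pre.countP (fun d => d.length == c.length)
      · subst hk
        rw [if_pos (by ring_nf)]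
        rw [List.getElem?_append_right (by omega)]
        simp [hlen]
      · rw [if_neg (by intro h; apply hk; injection h with h1 h2; exact_mod_cast h2)]
        rw [ih]
        by_cases hlt : k < (pre.filter (fun d => d.length == c.length)).length
        · rw [List.getElem?_append_left hlt]
        · rw [List.getElem?_append_right (by omega)]
          rw [List.getElem?_eq_none (by omega), List.getElem?_eq_none (by simp; omega)]

    · have h1 : ¬ (((L : Int), (k : Int)) = ((c.length : Int), (pre.countP (fun d => d.length == c.length) : Int))) := by
        intro h; injection h with ha hb; exact hL (by exact_mod_cast ha)
      rw [if_neg h1, ih]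
      have : (c.length == L) = false := by simp [Ne.symm hL]
      simp [this]

theorem prodGo (l1 l2 : List Int) (h : l1.length = l2.length) :
    ∀ (k a : Nat) (acc : List Int), a + k = l1.length →
    ((PySem.List.pyRange (2 * (a : Int)) ((l1.length : Int) + (l2.length : Int)) 1).foldl
      (fun (st : List Int × Int × Int) i =>
        if i % 2 == 0 then
          (st.1 ++ [PySem.List.pyGetD l1 st.2.1 0], st.2.1 + 1, st.2.2)
        else
          (st.1 ++ [PySem.List.pyGetD l2 st.2.2 0], st.2.1, st.2.2 + 1))
      (acc, (a : Int), (a : Int))).1 = acc ++ inter (l1.drop a) (l2.drop a) := by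
  intro k
  induction k with
  | zero =>
    intro a acc ha
    rw [PySem.List.pyRange_one_eq_nil (by omega)]
    have h1 : l1.drop a = [] := List.drop_eq_nil_of_le (by omega)
    have h2 : l2.drop a = [] := List.drop_eq_nil_of_le (by omega)
    simp [h1, h2, inter]
  | succ k ih =>
    intro a acc ha
    have halt : a < l1.length := by omega
    have halt2 : a < l2.length := by omega
    rw [PySem.List.pyRange_one_cons (by omega), List.foldl_cons]
    have hone : ((2 * (a : Int)) % 2 == 0) = true := by simp
    rw [if_pos (by simp)]
    rw [PySem.List.pyRange_one_cons (by omega), List.foldl_cons]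
    have htwo : ¬ (((2 * (a : Int) + 1) % 2 == 0) = true) := by simp
    rw [if_neg htwo]
    simp only
    have hg1 : PySem.List.pyGetD l1 ((a : Nat) : Int) 0 = l1[a] := by
      rw [PySem.List.pyGetD_natCast]; exact List.getD_eq_getElem l1 0 halt
    have hg2 : PySem.List.pyGetD l2 ((a : Nat) : Int) 0 = l2[a] := by
      rw [PySem.List.pyGetD_natCast]; exact List.getD_eq_getElem l2 0 halt2
    have hstart : (2 * (a : Int) + 1 + 1) = 2 * ((a + 1 : Nat) : Int) := by push_cast; ring
    have hsucc : ((a : Int) + 1) = ((a + 1 : Nat) : Int) := by push_cast; ring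
    rw [hg1, hg2, hstart, hsucc]
    rw [ih (a + 1) (acc ++ [l1[a]] ++ [l2[a]]) (by omega)]
    have hd1 : l1.drop a = l1[a] :: l1.drop (a + 1) := (List.getElem_cons_drop halt).symm
    have hd2 : l2.drop a = l2[a] :: l2.drop (a + 1) := (List.getElem_cons_drop halt2).symm
    rw [hd1, hd2]
    simp only [inter, List.zip_cons_cons, List.flatMap_cons]
    simp

theorem pyProduct_eq_inter (l1 l2 : List Int) (h : l1.length = l2.length) :
    pyProduct l1 l2 = inter l1 l2 := by
  have := prodGo l1 l2 h l1.length 0 [] (by omega)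
  simpa [pyProduct] using this

theorem SB_rks (suf : List (List Int)) : ∀ (pre : List (List Int)),
    (SB (pre ++ suf)).2.1 = (SB pre).2.1 ++ rks pre suf := by
  induction suf with
  | nil => intro pre; simp [rks]
  | cons c suf ih =>
    intro pre
    have h1 : pre ++ c :: suf = (pre ++ [c]) ++ suf := by simp
    rw [h1, ih (pre ++ [c])]
    have h2 : SB (pre ++ [c]) = stepB (SB pre) c := by simp [SB, List.foldl_append]
    rw [h2]
    simp only [stepB, rks]
    rw [SB_cnt pre c.length]
    simp

theorem foldB (cs : List (List Int)) :
    ∀ (suf pre : List (List Int)) (res : List (List Int)), cs = pre ++ suf →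
    (suf.zip (rks pre suf)).foldl
      (fun res ck =>
        if ck.2 % 2 == 0 then
          res ++ [(ck.1.zip ((SB cs).2.2.getD ((ck.1.length : Int), ck.2 + 1) [])).flatMap
                    (fun p => [p.1, p.2])]
        else res) res
      = res ++ go pre suf := by
  intro suf
  induction suf with
  | nil => intro pre res _; simp [rks, go]
  | cons c suf ih =>
    intro pre res hcs
    simp only [rks, List.zip_cons_cons, List.foldl_cons]
    set n := pre.countP (fun d => d.length == c.length) with hn
    have hcond : (((n : Int) % 2 == 0)) = (decide (n % 2 = 0)) := by
      by_cases h : n % 2 = 0 <;> simp [h] <;> omega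
    have hlook : (SB cs).2.2.getD ((c.length : Int), (n : Int) + 1) []
        = ((suf.find? (fun d => d.length == c.length)).getD []) := by
      have hcast : ((n : Int) + 1) = ((n + 1 : Nat) : Int) := by push_cast; ring
      rw [PySem.Dict.getD_eq_get?_getD, hcast, SB_tab cs c.length (n + 1)]
      rw [hcs, List.filter_append, List.filter_cons]
      simp only [beq_self_eq_true, if_true]
      have hlen : (pre.filter (fun d => d.length == c.length)).length = n :=
        Eq.symm List.countP_eq_length_filter
      rw [List.getElem?_append_right (by omega), hlen]
      simp only [Nat.add_sub_cancel_left, List.getElem?_cons_succ]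
      simp [← List.head?_eq_getElem?, List.head?_filter]
    rw [hlook, hcond]
    by_cases hpar : n % 2 = 0
    · simp only [hpar, decide_true, if_true]
      rw [ih (pre ++ [c]) _ (by simp [hcs])]
      simp only [go, hn.symm, if_pos hpar]
      simp [inter]
    · simp only [hpar, decide_false]
      rw [ih (pre ++ [c]) _ (by simp [hcs])]
      simp only [go, hn.symm, if_neg hpar]
      simp

theorem alt_eq_go (cs : List (List Int)) : evenCycleComposition_alt cs = go [] cs := by
  show (cs.zip (SB cs).2.1).foldl _ [] = go [] cs
  have h : (SB cs).2.1 = rks [] cs := by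
    have := SB_rks cs []
    simpa [SB] using this
  rw [h]
  exact foldB cs cs [] [] rfl

theorem loopA_acc' : ∀ (cs ans2 : List (List Int)), ∀ ans1, loopA cs (ans1 ++ ans2) = ans1 ++ loopA cs ans2 := by
  intro cs ans2
  induction cs, ans2 using loopA.induct with
  | case1 ans => intro ans1; simp [loopA]
  | case2 c rest ans r hr ih =>
    intro ans1
    have heq : ∀ a, loopA (c :: rest) a
        = loopA (rest.eraseIdx r) (a ++ [pyProduct c (rest.getD r [])]) := fun a => by
      rw [loopA, hr]
    rw [heq, heq, List.append_assoc]
    exact ih ans1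
  | case3 c rest ans hr =>
    intro ans1
    have heq : ∀ a, loopA (c :: rest) a = a := fun a => by rw [loopA, hr]
    rw [heq, heq]

theorem loopA_acc : ∀ (cs ans : List (List Int)), loopA cs ans = ans ++ loopA cs [] := by
  intro cs ans
  simpa using loopA_acc' cs [] ans

theorem A_eq_go : ∀ (n : Nat) (cs : List (List Int)), cs.length ≤ n →
    Pre_evenCycleComposition cs → loopA cs [] = go [] cs := by
  intro n
  induction n with
  | zero =>
    intro cs hlen _
    have : cs = [] := List.length_eq_zero_iff.mp (by omega)
    subst this; simp [loopA, go]
  | succ n ih =>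
    intro cs hlen hpre
    match cs with
    | [] => simp [loopA, go]
    | c :: rest =>
      -- the head has a partner
      have hcnt : (c :: rest).countP (fun d => d.length == c.length) % 2 = 0 :=
        Nat.even_iff.mp (hpre c (by simp))
      have hcons : (c :: rest).countP (fun d => d.length == c.length)
          = rest.countP (fun d => d.length == c.length) + 1 := by
        simp
      have hpos : 0 < rest.countP (fun d => d.length == c.length) := by omega
      have hex : ∃ x ∈ rest, (x.length == c.length) = true := by
        rcases List.countP_pos_iff.mp hpos with ⟨x, hx, hpx⟩
        exact ⟨x, hx, hpx⟩
      obtain ⟨r, hr⟩ := findIdx?_isSome _ rest hex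
      obtain ⟨hrlt, hpr, hprev⟩ := findIdx?_spec _ rest r hr
      have hplen : rest[r].length = c.length := by simpa using hpr
      -- rest decomposes
      have hdecomp : rest = rest.take r ++ rest[r] :: rest.drop (r + 1) := by
        conv_lhs => rw [← List.take_append_drop r rest]
        rw [List.getElem_cons_drop hrlt]
      have herase : rest.eraseIdx r = rest.take r ++ rest.drop (r + 1) :=
        List.eraseIdx_eq_take_drop_succ rest r
      -- unfold one step of loopA
      rw [show loopA (c :: rest) [] = loopA (rest.eraseIdx r) ([] ++ [pyProduct c (rest.getD r [])]) from by rw [loopA, hr]]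
      rw [loopA_acc]
      simp only [List.nil_append]
      -- the produced pair
      have hgetD : rest.getD r [] = rest[r] := List.getD_eq_getElem rest [] hrlt
      rw [hgetD, pyProduct_eq_inter c rest[r] hplen.symm]
      -- go unfolds on the other side
      have hfind : rest.find? (fun d => d.length == c.length) = some rest[r] := by
        conv_lhs => rw [hdecomp]
        rw [List.find?_append]
        have htake : (rest.take r).find? (fun d => d.length == c.length) = none := by
          rw [List.find?_eq_none]
          intro x hx
          rcases List.mem_take_iff_getElem.mp hx with ⟨j, hj, rfl⟩
          have hjr : j < r := by omega
          simpa using hprev j hjr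
        rw [htake, Option.none_or, List.find?_cons, hpr]
      rw [show go [] (c :: rest) = [inter c ((rest.find? (fun d => d.length == c.length)).getD [])] ++ go [c] rest from by simp [go]]
      rw [hfind]
      simp only [Option.getD_some, List.singleton_append, List.cons.injEq, true_and]
      -- remaining: loopA (eraseIdx) [] = go [c] rest
      have hpre' : Pre_evenCycleComposition (rest.eraseIdx r) := by
        intro c' hc'
        rw [Nat.even_iff]
        have hc'mem : c' ∈ c :: rest := by
          right; exact List.mem_of_mem_eraseIdx hc'
        have htot : (c :: rest).countP (fun d => d.length == c'.length) % 2 = 0 :=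
          Nat.even_iff.mp (hpre c' hc'mem)
        rw [herase] at hc' ⊢
        conv at htot => rw [List.countP_cons]
        conv at htot => rw [hdecomp]
        simp only [List.countP_append, List.countP_cons] at htot ⊢
        by_cases hL : c'.length = c.length
        · have h1 : (rest[r].length == c'.length) = true := by simp [hplen, hL]
          have h2 : (c.length == c'.length) = true := by simp [hL]
          rw [h1, h2] at htot
          omega
        · have h1 : (rest[r].length == c'.length) = false := by
            simp [hplen]; exact fun h => hL h.symm
          have h2 : (c.length == c'.length) = false := by
            simp; exact fun h => hL h.symm
          rw [h1, h2] at htot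
          omega
      have hlen' : (rest.eraseIdx r).length ≤ n := by
        have := List.length_eraseIdx_le (l := rest) (i := r)
        simp at hlen ⊢
        omega
      rw [ih (rest.eraseIdx r) hlen' hpre']
      -- go [c] rest = go [] (rest.eraseIdx r)
      rw [herase]
      conv_rhs => rw [hdecomp]
      symm
      apply go_erase
      · intro L hL
        simp only [List.countP_cons, List.countP_nil]
        have : (c.length == L) = false := by
          simp; exact fun h => hL (by omega)
        simp [this]
      · simp [hplen]
      · simp
      · intro a ha
        rcases List.mem_take_iff_getElem.mp ha with ⟨j, hj, rfl⟩
        have hjr : j < r := by omega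
        have := hprev j hjr
        simpa [hplen] using this

-- ===== VERDICT (by name: the statement is the Claim_ definition above) =====
theorem evenCycleComposition_spec : Claim_equal_evenCycleComposition := by
  intro cs _ hpre
  unfold Spec_evenCycleComposition evenCycleComposition
  rw [A_eq_go cs.length cs le_rfl hpre, alt_eq_go]
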